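-- pv_equiv track=rewrite | github.com/maitreyyi/cs121searchengine | scoring.py | proximity_match_in_doc
-- ===== SOURCE A (Python) =====
-- def proximity_match_in_doc(terms, doc_id, index, window_size=4):
--     try:
--         positions_lists = [index[term][str(doc_id)]["positions"] for term in terms]
--     except KeyError:
--         return False
--     if any(len(plist) > 2000 for plist in positions_lists):
--         return False
--
--     all_positions = sorted(pos for plist in positions_lists for pos in plist)
--     for i in range(len(all_positions) - len(terms) + 1):
--         window = all_positions[i + len(terms) - 1] - all_positions[i]
--         if window <= window_size:
--             return True
--     return False
-- ===== SOURCE B (Python) =====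
-- def proximity_match_in_doc(terms, doc_id, index, window_size=4):
--     try:
--         positions_lists = [index[term][str(doc_id)]["positions"] for term in terms]
--     except KeyError:
--         return False
--     if any(len(plist) > 2000 for plist in positions_lists):
--         return False
--     k = len(terms)
--     all_positions = [p for plist in positions_lists for p in plist]
--     cnt = {}
--     for p in all_positions:
--         cnt[p] = cnt.get(p, 0) + 1
--     # k positions fit in a window of span <= window_size iff some position x
--     # has at least k positions (counted with multiplicity) in [x, x + window_size]
--     for x in cnt:
--         total = 0
--         for v, c in cnt.items():
--             if x <= v <= x + window_size:
--                 total += c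
--         if total >= k:
--             return True
--     return False
-- ===== Notes on version B (the rewrite author's own statement) =====
-- stated objective: alternative
-- what changed: Replaces A's global sort plus fixed-k sliding-window scan by a sort-free counting algorithm: build a multiplicity dictionary of all positions and return True iff some position x has at least len(terms) positions (with multiplicity) inside the value interval [x, x+window_size].
import Mathlib
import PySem

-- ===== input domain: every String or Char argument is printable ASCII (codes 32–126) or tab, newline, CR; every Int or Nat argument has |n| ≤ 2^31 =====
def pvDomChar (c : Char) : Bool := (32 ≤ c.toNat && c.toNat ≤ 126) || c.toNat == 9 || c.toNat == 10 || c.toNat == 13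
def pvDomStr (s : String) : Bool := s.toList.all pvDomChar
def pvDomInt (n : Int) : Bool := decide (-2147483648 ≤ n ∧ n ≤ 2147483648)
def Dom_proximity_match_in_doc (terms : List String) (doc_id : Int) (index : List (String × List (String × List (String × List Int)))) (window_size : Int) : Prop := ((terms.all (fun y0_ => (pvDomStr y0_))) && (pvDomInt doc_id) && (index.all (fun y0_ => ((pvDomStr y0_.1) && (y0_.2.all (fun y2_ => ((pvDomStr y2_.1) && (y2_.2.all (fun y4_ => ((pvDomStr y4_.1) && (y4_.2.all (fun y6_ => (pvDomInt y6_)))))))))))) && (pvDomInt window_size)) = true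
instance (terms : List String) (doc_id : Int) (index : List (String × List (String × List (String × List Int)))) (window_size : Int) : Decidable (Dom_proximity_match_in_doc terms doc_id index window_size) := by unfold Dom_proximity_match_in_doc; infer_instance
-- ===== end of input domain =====

-- B replaces A's global sort + fixed-k sliding-window scan by a sort-free counting
-- algorithm over a multiplicity dictionary (alternative algorithm, not claimed faster).

-- ===== PORT A =====
-- the try-block's list comprehension (identical in Source A and Source B; shared): none = KeyError
def lookupPositions (terms : List String) (docKey : String)
    (index : List (String × List (String × List (String × List Int)))) : Option (List (List Int)) :=
  match terms with
  | [] => some []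
  | t :: rest =>
    match (PySem.Dict.mk index).get? t with
    | none => none
    | some d1 =>
      match (PySem.Dict.mk d1).get? docKey with
      | none => none
      | some d2 =>
        match (PySem.Dict.mk d2).get? "positions" with
        | none => none
        | some pl =>
          match lookupPositions rest docKey index with
          | none => none
          | some ls => some (pl :: ls)

-- the for-i-in-range loop with early return (index failure = IndexError, excluded by Pre_)
def aLoop (allp : List Int) (k : Int) (ws : Int) : List Int → Bool
  | [] => false
  | i :: rest =>
    match PySem.List.pyGet? allp (i + k - 1), PySem.List.pyGet? allp i with
    | some hi, some lo => if hi - lo ≤ ws then true else aLoop allp k ws rest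
    | _, _ => false

def proximity_match_in_doc (terms : List String) (doc_id : Int) (index : List (String × List (String × List (String × List Int)))) (window_size : Int) : Bool :=
  match lookupPositions terms (PySem.Int.toStr doc_id) index with
  | none => false
  | some pls =>
    if pls.any (fun pl => pl.length > 2000) then false
    else
      let allp := PySem.List.sorted pls.flatten (fun x => x) false
      aLoop allp (terms.length : Int) window_size
        (PySem.List.pyRange 0 ((allp.length : Int) - (terms.length : Int) + 1) 1)

-- ===== PORT B =====
-- total = sum of multiplicities of the dict entries lying in [x, x + ws]
def bTotal (items : List (Int × Int)) (x ws : Int) : Int :=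
  items.foldl (fun acc vc => if x ≤ vc.1 ∧ vc.1 ≤ x + ws then acc + vc.2 else acc) 0

-- the 'for x in cnt' loop with early return
def bScan (items : List (Int × Int)) (k ws : Int) : List Int → Bool
  | [] => false
  | x :: rest => if bTotal items x ws ≥ k then true else bScan items k ws rest

def proximity_match_in_doc_alt (terms : List String) (doc_id : Int) (index : List (String × List (String × List (String × List Int)))) (window_size : Int) : Bool :=
  match lookupPositions terms (PySem.Int.toStr doc_id) index with
  | none => false
  | some pls =>
    if pls.any (fun pl => pl.length > 2000) then false
    else
      let allp := pls.flatten
      let cnt := allp.foldl (fun d p => d.insert p (d.getD p 0 + 1)) PySem.Dict.empty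
      bScan cnt.items (terms.length : Int) window_size cnt.keys

-- ===== PRECONDITION & SPEC =====
-- Pre_ excludes only terms = [], where A's final loop indexes the empty merged
-- position list at -1 and raises IndexError.
def Pre_proximity_match_in_doc (terms : List String) (doc_id : Int) (index : List (String × List (String × List (String × List Int)))) (window_size : Int) : Prop := terms ≠ []
instance (terms : List String) (doc_id : Int) (index : List (String × List (String × List (String × List Int)))) (window_size : Int) : Decidable (Pre_proximity_match_in_doc terms doc_id index window_size) := by unfold Pre_proximity_match_in_doc; infer_instance

def pvWitness_proximity_match_in_doc : List String × Int × (List (String × List (String × List (String × List Int)))) × Int :=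
  (["a"], 0, [("a", [("0", [("positions", [1, 3])])])], 4)

def Spec_proximity_match_in_doc (terms : List String) (doc_id : Int) (index : List (String × List (String × List (String × List Int)))) (window_size : Int) (out : Bool) : Prop := out = proximity_match_in_doc_alt terms doc_id index window_size
instance (terms : List String) (doc_id : Int) (index : List (String × List (String × List (String × List Int)))) (window_size : Int) (out : Bool) : Decidable (Spec_proximity_match_in_doc terms doc_id index window_size out) := by unfold Spec_proximity_match_in_doc; infer_instance

-- ===== CLAIM (what is proved, stated in full; the proofs are below) =====
def Claim_equal_proximity_match_in_doc : Prop := ∀ (terms : List String) (doc_id : Int) (index : List (String × List (String × List (String × List Int)))) (window_size : Int), Dom_proximity_match_in_doc terms doc_id index window_size → Pre_proximity_match_in_doc terms doc_id index window_size → Spec_proximity_match_in_doc terms doc_id index window_size (proximity_match_in_doc terms doc_id index window_size)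

-- ===== LEMMAS AND PROOFS =====

-- the common window predicate A's loop computes
def winAny (k : Nat) (ws : Int) (xs : List Int) : Bool :=
  (xs.zip (xs.drop (k - 1))).any (fun q => decide (q.2 - q.1 ≤ ws))

lemma winAny_short (k : Nat) (ws : Int) (xs : List Int) (h : xs.length < k) :
    winAny k ws xs = false := by
  have hd : xs.drop (k - 1) = [] := List.drop_eq_nil_of_le (by omega)
  simp [winAny, hd]

lemma winAny_cons (k : Nat) (ws : Int) (xs : List Int) (hk : 1 ≤ k) (h : k ≤ xs.length) :
    winAny k ws xs =
      (decide (xs.getD (k - 1) 0 - xs.getD 0 0 ≤ ws) || winAny k ws (xs.drop 1)) := by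
  match xs with
  | [] => simp at h; omega
  | z :: t =>
    have hk1 : k - 1 < (z :: t).length := by simp at h ⊢; omega
    have hdrop : (z :: t).drop (k - 1) = (z :: t)[k - 1] :: (z :: t).drop (k - 1 + 1) :=
      List.drop_eq_getElem_cons hk1
    have hsucc : (z :: t).drop (k - 1 + 1) = t.drop (k - 1) := by
      have : k - 1 + 1 = (k - 1) + 1 := rfl
      rw [this, List.drop_succ_cons]
    rw [winAny, hdrop, hsucc, List.zip_cons_cons, List.any_cons]
    have hgd : (z :: t).getD (k - 1) 0 = (z :: t)[k - 1] := List.getD_eq_getElem _ _ hk1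
    simp [winAny, List.getElem?_eq_getElem hk1]

lemma aLoop_winAny (k : Nat) (hk : 1 ≤ k) (ws : Int) (xs : List Int) :
    ∀ (d a : Nat), (xs.length : Int) - k + 1 - a ≤ d →
      aLoop xs (k : Int) ws (PySem.List.pyRange a ((xs.length : Int) - k + 1) 1)
        = winAny k ws (xs.drop a) := by
  intro d
  induction d with
  | zero =>
    intro a ha
    have hnil : PySem.List.pyRange a ((xs.length : Int) - k + 1) 1 = [] :=
      PySem.List.pyRange_one_eq_nil (by omega)
    rw [hnil]
    have hlen : (xs.drop a).length < k := by
      simp only [List.length_drop]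
      omega
    rw [winAny_short _ _ _ hlen]
    rfl
  | succ d ih =>
    intro a ha
    by_cases hend : ((xs.length : Int) - k + 1) ≤ a
    · have hnil : PySem.List.pyRange a ((xs.length : Int) - k + 1) 1 = [] :=
        PySem.List.pyRange_one_eq_nil hend
      rw [hnil]
      have hlen : (xs.drop a).length < k := by
        simp only [List.length_drop]; omega
      rw [winAny_short _ _ _ hlen]
      rfl
    · rw [not_le] at hend
      have hcons := PySem.List.pyRange_one_cons (a := (a : Int)) (b := (xs.length : Int) - k + 1) hend
      rw [hcons]
      have hi1 : a + k - 1 < xs.length := by omega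
      have hi0 : a < xs.length := by omega
      have hg1 : PySem.List.pyGet? xs ((a : Int) + (k : Int) - 1) = some xs[a + k - 1] := by
        have : (a : Int) + (k : Int) - 1 = ((a + k - 1 : Nat) : Int) := by push_cast; omega
        rw [this, PySem.List.pyGet?_natCast, List.getElem?_eq_getElem hi1]
      have hg0 : PySem.List.pyGet? xs ((a : Int)) = some xs[a] := by
        rw [PySem.List.pyGet?_natCast, List.getElem?_eq_getElem hi0]
      have hdlen : k ≤ (xs.drop a).length := by simp only [List.length_drop]; omega
      rw [winAny_cons k ws _ hk hdlen]
      have hgd1 : (xs.drop a).getD (k - 1) 0 = xs[a + k - 1] := by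
        rw [List.getD_eq_getElem _ _ (by simp only [List.length_drop]; omega)]
        rw [List.getElem_drop]
        congr 1
        omega
      have hgd0 : (xs.drop a).getD 0 0 = xs[a] := by
        rw [List.getD_eq_getElem _ _ (by simp only [List.length_drop]; omega)]
        simp [List.getElem_drop]
      have hstep : ((a + 1 : Nat) : Int) = ((a : Int) + 1) := by push_cast; ring_nf
      have hrec := ih (a + 1) (by omega)
      rw [hstep] at hrec
      rw [aLoop, hg1, hg0, hgd1, hgd0]
      by_cases hc : xs[a + k - 1] - xs[a] ≤ ws
      · simp [hc]
      · simp only [if_neg hc, decide_eq_false hc, Bool.false_or, List.drop_drop]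
        rw [hrec]

lemma winAny_iff (k : Nat) (hk : 1 ≤ k) (ws : Int) (xs : List Int) :
    winAny k ws xs = true ↔
      ∃ i : Nat, ∃ h : i + (k - 1) < xs.length, xs[i + (k - 1)] - xs[i]'(by omega) ≤ ws := by
  unfold winAny
  rw [List.any_eq_true]
  constructor
  · rintro ⟨q, hq, hpred⟩
    obtain ⟨i, hi, hqe⟩ := List.mem_iff_getElem.1 hq
    have hlen : (xs.zip (xs.drop (k - 1))).length = min xs.length (xs.length - (k - 1)) := by
      simp [List.length_zip]
    have hib : i + (k - 1) < xs.length := by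
      rw [hlen] at hi; omega
    refine ⟨i, hib, ?_⟩
    have hz : (xs.zip (xs.drop (k - 1)))[i] = (xs[i]'(by omega), (xs.drop (k - 1))[i]'(by simp [List.length_drop]; omega)) := by
      apply List.getElem_zip
    have hd : (xs.drop (k - 1))[i]'(by simp [List.length_drop]; omega) = xs[(k - 1) + i]'(by omega) := by
      apply List.getElem_drop
    rw [hz, hd] at hqe
    rw [← hqe] at hpred
    simp only [decide_eq_true_eq] at hpred
    have : (k - 1) + i = i + (k - 1) := by omega
    simp only [this] at hpred
    exact hpred
  · rintro ⟨i, hib, hle⟩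
    have hi : i < (xs.zip (xs.drop (k - 1))).length := by
      simp [List.length_zip, List.length_drop]; omega
    refine ⟨(xs.zip (xs.drop (k - 1)))[i], List.getElem_mem hi, ?_⟩
    have hz : (xs.zip (xs.drop (k - 1)))[i] = (xs[i]'(by omega), (xs.drop (k - 1))[i]'(by simp [List.length_drop]; omega)) := by
      apply List.getElem_zip
    have hd : (xs.drop (k - 1))[i]'(by simp [List.length_drop]; omega) = xs[(k - 1) + i]'(by omega) := by
      apply List.getElem_drop
    rw [hz, hd]
    simp only [decide_eq_true_eq]
    have : (k - 1) + i = i + (k - 1) := by omega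
    simp only [this]
    exact hle



lemma countP_split {α : Type} (L : List α) (p q : α → Bool) :
    L.countP p = L.countP (fun a => p a && q a) + L.countP (fun a => p a && !q a) := by
  induction L with
  | nil => simp
  | cons a t ih =>
    simp only [List.countP_cons]
    cases hp : p a <;> cases hq : q a <;> simp [hp, hq, ih] <;> omega

lemma sorted_rank (S : List Int) (hs : S.Pairwise (· ≤ ·)) (p : Int → Bool)
    (hp : ∀ u v : Int, u ≤ v → p v = true → p u = true) :
    ∀ j (hj : j < S.length), (p S[j] = true ↔ j < S.countP p) := by
  induction S with
  | nil => intro j hj; simp at hj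
  | cons a t ih =>
    have ha : ∀ x ∈ t, a ≤ x := (List.pairwise_cons.1 hs).1
    have ht := (List.pairwise_cons.1 hs).2
    intro j hj
    match j with
    | 0 =>
      simp only [List.getElem_cons_zero, List.countP_cons]
      cases hpa : p a with
      | true => simp
      | false =>
        have h0 : t.countP p = 0 := by
          rw [List.countP_eq_zero]
          intro x hx hpx
          have := hp a x (ha x hx) hpx
          simp [hpa] at this
        simp [h0]
    | j + 1 =>
      simp only [List.getElem_cons_succ, List.countP_cons]
      cases hpa : p a with
      | true =>
        rw [ih ht j (by simpa using hj)]
        simp only [hpa, if_true]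
        omega
      | false =>
        have h0 : t.countP p = 0 := by
          rw [List.countP_eq_zero]
          intro x hx hpx
          have := hp a x (ha x hx) hpx
          simp [hpa] at this
        have hj' : j < t.length := by simpa using hj
        have hmem : t[j] ∈ t := List.getElem_mem hj'
        constructor
        · intro hpx
          have := hp a _ (ha _ hmem) hpx
          simp [hpa] at this
        · intro hlt
          rw [h0] at hlt
          simp [hpa] at hlt

lemma win_iff_count (S : List Int) (hs : S.Pairwise (· ≤ ·)) (k : Nat) (hk : 1 ≤ k) (ws : Int) :
    winAny k ws S = true ↔
      ∃ x ∈ S, k ≤ S.countP (fun p => decide (x ≤ p ∧ p ≤ x + ws)) := by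
  have hmono : ∀ p q (hq : q < S.length) (hpq : p ≤ q), S[p]'(by omega) ≤ S[q] := by
    intro p q hq hpq
    rcases Nat.lt_or_eq_of_le hpq with h | h
    · exact List.pairwise_iff_getElem.mp hs p q (by omega) hq h
    · subst h; rfl
  have hrank_lt : ∀ (x : Int) (j) (hj : j < S.length),
      (decide (S[j] < x) = true ↔ j < S.countP (fun p => decide (p < x))) := by
    intro x
    exact sorted_rank S hs (fun p => decide (p < x))
      (by intro u v huv h; exact decide_eq_true (by have := of_decide_eq_true h; omega))
  have hrank_le : ∀ (y : Int) (j) (hj : j < S.length),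
      (decide (S[j] ≤ y) = true ↔ j < S.countP (fun p => decide (p ≤ y))) := by
    intro y
    exact sorted_rank S hs (fun p => decide (p ≤ y))
      (by intro u v huv h; exact decide_eq_true (by have := of_decide_eq_true h; omega))
  have hkey : ∀ x : Int, 0 ≤ ws →
      S.countP (fun p => decide (p ≤ x + ws))
        = S.countP (fun p => decide (p < x)) + S.countP (fun p => decide (x ≤ p ∧ p ≤ x + ws)) := by
    intro x hws
    have h := countP_split S (fun p => decide (p ≤ x + ws)) (fun p => decide (p < x))
    have e1 : S.countP (fun p => decide (p ≤ x + ws) && decide (p < x))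
        = S.countP (fun p => decide (p < x)) := by
      apply List.countP_congr
      intro a _
      by_cases h1 : a < x
      · have h2 : a ≤ x + ws := by omega
        simp [h1, h2]
      · simp [h1]
    have e2 : S.countP (fun p => decide (p ≤ x + ws) && !decide (p < x))
        = S.countP (fun p => decide (x ≤ p ∧ p ≤ x + ws)) := by
      apply List.countP_congr
      intro a _
      by_cases h1 : a < x
      · have h2 : ¬ (x ≤ a) := by omega
        simp [h1, h2]
      · by_cases h2 : a ≤ x + ws <;> simp [h1, h2] <;> omega
    rw [h, e1, e2]
  constructor
  · intro hw
    obtain ⟨i, hib, hle⟩ := (winAny_iff k hk ws S).1 hw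
    have hii : i < S.length := by omega
    have hws : 0 ≤ ws := by
      have := hmono i (i + (k - 1)) hib (by omega)
      omega
    refine ⟨S[i], List.getElem_mem hii, ?_⟩
    have hA : ¬ (i < S.countP (fun p => decide (p < S[i]))) := by
      rw [← hrank_lt S[i] i hii]
      simp
    have hB : i + (k - 1) < S.countP (fun p => decide (p ≤ S[i] + ws)) := by
      rw [← hrank_le (S[i] + ws) (i + (k - 1)) hib]
      simp
      omega
    have := hkey S[i] hws
    omega
  · rintro ⟨x, hxS, hc⟩
    have hpos : 0 < S.countP (fun p => decide (x ≤ p ∧ p ≤ x + ws)) := by omega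
    obtain ⟨a, _, hpa⟩ := List.countP_pos_iff.1 hpos
    have hws : 0 ≤ ws := by simp at hpa; omega
    have hkey' := hkey x hws
    have hblen : S.countP (fun p => decide (p ≤ x + ws)) ≤ S.length := List.countP_le_length
    set a0 := S.countP (fun p => decide (p < x)) with ha0
    have hib : a0 + (k - 1) < S.length := by omega
    have hlo : ¬ (S[a0]'(by omega) < x) := by
      intro h
      have := (hrank_lt x a0 (by omega)).1 (by simpa using h)
      omega
    have hhi : S[a0 + (k - 1)] ≤ x + ws := by
      have := (hrank_le (x + ws) (a0 + (k - 1)) hib).2 (by omega)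
      simpa using this
    exact (winAny_iff k hk ws S).2 ⟨a0, hib, by omega⟩


-- bScan is an 'any' over the keys
lemma bScan_any (items : List (Int × Int)) (k ws : Int) (xs : List Int) :
    bScan items k ws xs = xs.any (fun x => decide (k ≤ bTotal items x ws)) := by
  induction xs with
  | nil => rfl
  | cons x rest ih =>
    by_cases h : bTotal items x ws ≥ k <;> simp [bScan, h, ih]

lemma foldl_if_add (x ws : Int) (l : List (Int × Int)) (a : Int) :
    l.foldl (fun acc vc => if x ≤ vc.1 ∧ vc.1 ≤ x + ws then acc + vc.2 else acc) a
      = a + (l.map (fun vc => if x ≤ vc.1 ∧ vc.1 ≤ x + ws then vc.2 else 0)).sum := by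
  induction l generalizing a with
  | nil => simp
  | cons vc t ih =>
    simp only [List.foldl_cons, List.map_cons, List.sum_cons, ih]
    by_cases h : x ≤ vc.1 ∧ vc.1 ≤ x + ws <;> simp [h] <;> ring

lemma count_single (x ws v : Int) (L : List Int) :
    L.countP (fun p => decide (x ≤ p ∧ p ≤ x + ws) && (p == v))
      = if x ≤ v ∧ v ≤ x + ws then L.count v else 0 := by
  by_cases hv : x ≤ v ∧ v ≤ x + ws
  · rw [if_pos hv]
    rw [List.count_eq_countP]
    apply List.countP_congr
    intro a _
    by_cases h : a = v
    · subst h; simp [hv]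
    · simp [h]
  · rw [if_neg hv]
    apply List.countP_eq_zero.2
    intro a _
    by_cases h : a = v
    · subst h; simp [hv]
    · simp [h]

lemma sum_if_count (x ws : Int) (keys : List Int) : ∀ L : List Int, keys.Nodup →
    (∀ v, v ∈ keys ↔ v ∈ L) →
    (keys.map (fun v => if x ≤ v ∧ v ≤ x + ws then (L.count v : Int) else 0)).sum
      = (L.countP (fun p => decide (x ≤ p ∧ p ≤ x + ws)) : Int) := by
  induction keys with
  | nil =>
    intro L _ hmem
    have hL : L = [] := List.eq_nil_iff_forall_not_mem.2 (fun v hv => by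
      have := (hmem v).2 hv; simp at this)
    simp [hL]
  | cons v rest ih =>
    intro L hnd hmem
    have hvnr : v ∉ rest := (List.nodup_cons.1 hnd).1
    have hndr : rest.Nodup := (List.nodup_cons.1 hnd).2
    have hmem' : ∀ w, w ∈ rest ↔ w ∈ L.filter (fun p => !(p == v)) := by
      intro w
      constructor
      · intro hw
        have hwL : w ∈ L := (hmem w).1 (List.mem_cons_of_mem _ hw)
        have hwv : w ≠ v := fun h => hvnr (h ▸ hw)
        simp [List.mem_filter, hwL, hwv]
      · intro hw
        rw [List.mem_filter] at hw
        have hwv : w ≠ v := by simpa using hw.2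
        rcases List.mem_cons.1 ((hmem w).2 hw.1) with h | h
        · exact absurd h hwv
        · exact h
    have hrec := ih (L.filter (fun p => !(p == v))) hndr hmem'
    -- counts in the filtered list agree for keys ≠ v
    have hmap : rest.map (fun w => if x ≤ w ∧ w ≤ x + ws then ((L.filter (fun p => !(p == v))).count w : Int) else 0)
        = rest.map (fun w => if x ≤ w ∧ w ≤ x + ws then (L.count w : Int) else 0) := by
      apply List.map_congr_left
      intro w hw
      have hwv : w ≠ v := fun h => hvnr (h ▸ hw)
      have : (L.filter (fun p => !(p == v))).count w = L.count w := by
        rw [List.count_filter]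
        simp [hwv]
      rw [this]
    -- split countP of L at v
    have hsplit := countP_split L (fun p => decide (x ≤ p ∧ p ≤ x + ws)) (fun p => p == v)
    have hfil : L.countP (fun p => decide (x ≤ p ∧ p ≤ x + ws) && !(p == v))
        = (L.filter (fun p => !(p == v))).countP (fun p => decide (x ≤ p ∧ p ≤ x + ws)) := by
      rw [List.countP_filter]
    have hone := count_single x ws v L
    rw [hmap] at hrec
    rw [List.map_cons, List.sum_cons, hrec, ← hfil, hsplit, hone]
    by_cases hv : x ≤ v ∧ v ≤ x + ws <;> simp [hv] <;> push_cast <;> ring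

-- bTotal over the counter's items is countP of the underlying list
lemma bTotal_counter (L : List Int) (x ws : Int) :
    bTotal (PySem.Dict.counter L).items x ws
      = (L.countP (fun p => decide (x ≤ p ∧ p ≤ x + ws)) : Int) := by
  rw [bTotal, foldl_if_add, PySem.Dict.items_counter]
  rw [List.map_map]
  have : ((fun vc : Int × Int => if x ≤ vc.1 ∧ vc.1 ≤ x + ws then vc.2 else 0) ∘
      (fun k => (k, (L.count k : Int))))
      = fun v => if x ≤ v ∧ v ≤ x + ws then (L.count v : Int) else 0 := rfl
  rw [this, sum_if_count x ws _ L (PySem.Set.nodup_ofList L) (fun v => PySem.Set.mem_ofList L v)]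
  ring

-- ===== VERDICT (by name: the statement is the Claim_ definition above) =====
theorem proximity_match_in_doc_spec : Claim_equal_proximity_match_in_doc := by
  intro terms doc_id index window_size _ hpre
  unfold Spec_proximity_match_in_doc proximity_match_in_doc proximity_match_in_doc_alt
  rcases hlk : lookupPositions terms (PySem.Int.toStr doc_id) index with _ | pls
  · rfl
  · simp only
    by_cases hg : pls.any (fun pl => pl.length > 2000)
    · simp [hg]
    · simp only [hg, if_neg, Bool.false_eq_true, not_false_eq_true]
      have hk : 1 ≤ terms.length := by
        rcases terms with _ | _
        · exact absurd rfl hpre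
        · simp
      set L := pls.flatten with hL
      set S := PySem.List.sorted L (fun x => x) false with hS
      -- A's loop is winAny over the sorted list
      have hA : aLoop S (terms.length : Int) window_size
          (PySem.List.pyRange 0 ((S.length : Int) - (terms.length : Int) + 1) 1)
            = winAny terms.length window_size S := by
        have := aLoop_winAny terms.length hk window_size S
          (((S.length : Int) - terms.length + 1).toNat + 1) 0 (by omega)
        simpa using this
      -- B's dict is the counter of L
      have hC : L.foldl (fun d p => d.insert p (d.getD p 0 + 1)) PySem.Dict.empty
          = PySem.Dict.counter L := PySem.Dict.foldl_insert_getD_add_one_eq_counter L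
      rw [hA, hC, bScan_any, PySem.Dict.keys_counter]
      -- both sides decide the same existential
      have hsorted : S.Pairwise (· ≤ ·) := PySem.List.sorted_pairwise L (fun x => x)
      have hperm : S.Perm L := PySem.List.sorted_perm L (fun x => x) false
      rw [Bool.eq_iff_iff, List.any_eq_true]
      rw [win_iff_count S hsorted terms.length hk window_size]
      constructor
      · rintro ⟨x, hxS, hcnt⟩
        refine ⟨x, (PySem.Set.mem_ofList L x).2 (hperm.mem_iff.1 hxS), ?_⟩
        rw [bTotal_counter]
        rw [hperm.countP_eq] at hcnt
        exact decide_eq_true (by exact_mod_cast hcnt)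
      · rintro ⟨x, hxK, hdec⟩
        rw [bTotal_counter] at hdec
        have hcnt : (terms.length : Int) ≤ (L.countP (fun p => decide (x ≤ p ∧ p ≤ x + window_size)) : Int) :=
          of_decide_eq_true hdec
        refine ⟨x, hperm.mem_iff.2 ((PySem.Set.mem_ofList L x).1 hxK), ?_⟩
        rw [hperm.countP_eq]
        exact_mod_cast hcnt
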